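-- pv_equiv track=rewrite | github.com/ICS3U-Programming-VanN/Assign-04-Python | greatest_common_factor.py | find_greatest_factor
-- ===== SOURCE A (Python) =====
-- def find_greatest_factor(numbers, highest_num):
--     # Initialize Variable
--     common_factors = []
--
--     # Iterates through for each index/number in the list of numbers
--     for index in range(0, len(numbers)):
--         # Find the factors of each index
--         for counter in range(1, highest_num + 1):
--             # IF the index is evenly divisible by the incrementing counter
--             if numbers[index] % counter == 0:
--                 # Adds the number/factor to the common_factors list
--                 common_factors.append(counter)
--
--     # Iterates through for each index/number in the list of numbers
--     for index in range(0, len(numbers)):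
--         # Goes through the factors of the indexes
--         for counter in range(1, highest_num + 1):
--             # IF there are factors in the common_factors list that an index does not have
--             if numbers[index] % counter != 0 and counter in common_factors:
--                 # Ensures that all wrong factors are removed
--                 while counter in common_factors:
--                     # Removes all unshared factors
--                     common_factors.remove(counter)
--
--     # Returns the greatest common factor
--     return max(common_factors)
-- ===== SOURCE B (Python) =====
-- def find_greatest_factor(numbers, highest_num):
--     if not numbers or highest_num < 1:
--         raise ValueError("max() arg is an empty sequence")
--     # gcd of all numbers (Euclid), one pass
--     g = 0
--     for n in numbers:
--         a, b = g, abs(n)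
--         while b:
--             a, b = b, a % b
--         g = a
--     if g == 0:
--         # all numbers are zero: every counter in 1..highest_num divides them
--         return highest_num
--     # largest divisor of g that is <= highest_num
--     c = g if g < highest_num else highest_num
--     while g % c != 0:
--         c -= 1
--     return c
-- ===== Notes on version B (the rewrite author's own statement) =====
-- stated objective: faster
-- what changed: Replaces A's two O(n*H) passes that build and then prune a multiset of per-number factors with a single gcd fold over the numbers followed by one downward scan for the largest divisor of the gcd that is <= highest_num; Pre_ excludes empty numbers and highest_num < 1, on which both A and B raise ValueError.
import Mathlib
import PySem

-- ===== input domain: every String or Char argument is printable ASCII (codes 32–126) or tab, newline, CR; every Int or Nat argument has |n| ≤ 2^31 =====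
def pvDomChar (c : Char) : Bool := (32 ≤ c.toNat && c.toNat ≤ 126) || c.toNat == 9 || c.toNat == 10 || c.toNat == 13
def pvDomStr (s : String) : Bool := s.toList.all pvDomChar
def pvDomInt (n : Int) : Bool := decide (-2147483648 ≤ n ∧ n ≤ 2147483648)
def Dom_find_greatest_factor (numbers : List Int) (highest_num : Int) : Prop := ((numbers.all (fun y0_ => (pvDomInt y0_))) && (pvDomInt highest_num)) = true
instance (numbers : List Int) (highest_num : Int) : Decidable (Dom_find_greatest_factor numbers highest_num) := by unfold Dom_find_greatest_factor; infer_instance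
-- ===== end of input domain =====

-- B replaces A's build-then-prune factor multiset (two O(n*H) passes) by one gcd fold
-- plus a downward scan for the largest divisor of the gcd that is <= highest_num (faster).

-- ===== PORT A =====
-- 'while counter in common_factors: common_factors.remove(counter)' — fuel = list length
-- (an upper bound on the number of removals; the loop removes one occurrence per step)
def fgfRemoveAll (fuel : Nat) (l : List Int) (c : Int) : List Int :=
  match fuel with
  | 0 => l
  | f + 1 => if l.contains c then fgfRemoveAll f ((PySem.List.remove? l c).getD l) c else l

def find_greatest_factor (numbers : List Int) (highest_num : Int) : Int :=
  -- first double loop: collect every counter in 1..highest_num dividing each number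
  let cf1 := numbers.foldl (fun cf n =>
      (PySem.List.pyRange 1 (highest_num + 1) 1).foldl (fun cf c =>
        if PySem.Int.mod n c == 0 then cf ++ [c] else cf) cf) []
  -- second double loop: remove every counter some number is not divisible by
  let cf2 := numbers.foldl (fun cf n =>
      (PySem.List.pyRange 1 (highest_num + 1) 1).foldl (fun cf c =>
        if !(PySem.Int.mod n c == 0) && cf.contains c then fgfRemoveAll cf.length cf c else cf) cf) cf1
  -- max(common_factors); raises ValueError on [] — excluded by Pre_, default 0 unreachable there
  (PySem.List.max? cf2 (fun x => x)).getD 0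

-- ===== PORT B =====
-- 'while b: a, b = b, a % b' — b is always nonnegative here (abs, then mods by positive b),
-- so the Python test 'b' is exactly 0 < b
def fgfEuclid (a b : Int) : Int :=
  if h : 0 < b then fgfEuclid b (PySem.Int.mod a b) else a
termination_by b.toNat
decreasing_by
  have h1 := PySem.Int.mod_nonneg a h
  have h2 := PySem.Int.mod_lt a h
  omega

-- 'while g % c != 0: c -= 1' — fuel = c.toNat bounds the number of decrements (c stops at 1)
def fgfScan (g : Int) (c : Int) (fuel : Nat) : Int :=
  match fuel with
  | 0 => c
  | f + 1 => if PySem.Int.mod g c == 0 then c else fgfScan g (c - 1) f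

def find_greatest_factor_alt (numbers : List Int) (highest_num : Int) : Int :=
  -- the Python guard raises ValueError; outside Pre_, default 0 unreachable there
  if numbers.isEmpty || highest_num < 1 then 0
  else
    let g := numbers.foldl (fun g n => fgfEuclid g (n.natAbs : Int)) 0
    if g == 0 then highest_num
    else
      let c0 := if g < highest_num then g else highest_num
      fgfScan g c0 c0.toNat

-- ===== PRECONDITION & SPEC =====
-- Pre_ excludes exactly the inputs where A raises ValueError (max of an empty list:
-- empty numbers, or highest_num < 1 so no counter is ever collected); B raises there too.
def Pre_find_greatest_factor (numbers : List Int) (highest_num : Int) : Prop :=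
  numbers ≠ [] ∧ 1 ≤ highest_num
instance (numbers : List Int) (highest_num : Int) : Decidable (Pre_find_greatest_factor numbers highest_num) := by unfold Pre_find_greatest_factor; infer_instance

def pvWitness_find_greatest_factor : List Int × Int := ([12, 18], 10)

def Spec_find_greatest_factor (numbers : List Int) (highest_num : Int) (out : Int) : Prop := out = find_greatest_factor_alt numbers highest_num
instance (numbers : List Int) (highest_num : Int) (out : Int) : Decidable (Spec_find_greatest_factor numbers highest_num out) := by unfold Spec_find_greatest_factor; infer_instance

-- ===== CLAIM (what is proved, stated in full; the proofs are below) =====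
def Claim_equal_find_greatest_factor : Prop := ∀ (numbers : List Int) (highest_num : Int), Dom_find_greatest_factor numbers highest_num → Pre_find_greatest_factor numbers highest_num → Spec_find_greatest_factor numbers highest_num (find_greatest_factor numbers highest_num)

-- ===== LEMMAS AND PROOFS =====

theorem fgf_euclid_eq_gcd (a b : Int) (ha : 0 ≤ a) (hb : 0 ≤ b) :
    fgfEuclid a b = (Int.gcd a b : Int) := by
  by_cases h : 0 < b
  · have hm1 := PySem.Int.mod_nonneg a h
    have hm2 := PySem.Int.mod_lt a h
    rw [fgfEuclid]
    simp only [h, dite_true]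
    rw [fgf_euclid_eq_gcd b (PySem.Int.mod a b) (le_of_lt h) hm1]
    rw [PySem.Int.mod_eq_emod_of_pos (a := a) h, Int.gcd_comm, Int.gcd_emod]
  · rw [fgfEuclid]
    simp only [h, dite_false]
    have : b = 0 := le_antisymm (not_lt.mp h) hb
    subst this
    simp [Int.gcd, Int.natAbs_of_nonneg ha]
termination_by b.toNat
decreasing_by
  have h1 := PySem.Int.mod_nonneg a h
  have h2 := PySem.Int.mod_lt a h
  omega

-- the gcd fold of B, in mathematical form
def fgfG (numbers : List Int) : Int := numbers.foldl (fun g n => (Int.gcd g n : Int)) 0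

theorem fgf_fold_aux (l : List Int) : ∀ (g : Int), 0 ≤ g →
    l.foldl (fun g n => fgfEuclid g (n.natAbs : Int)) g = l.foldl (fun g n => (Int.gcd g n : Int)) g := by
  induction l with
  | nil => intro g _; rfl
  | cons n t ih =>
    intro g hg
    simp only [List.foldl_cons]
    rw [fgf_euclid_eq_gcd g (n.natAbs : Int) hg (by positivity)]
    have : Int.gcd g (n.natAbs : Int) = Int.gcd g n := by simp [Int.gcd, Int.natAbs_abs]
    rw [this, ih _ (by positivity)]

theorem fgf_fold_eq_G (numbers : List Int) :
    numbers.foldl (fun g n => fgfEuclid g (n.natAbs : Int)) 0 = fgfG numbers := by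
  exact fgf_fold_aux numbers 0 le_rfl

theorem fgf_dvd_aux (c : Int) (l : List Int) : ∀ (g : Int),
    (c ∣ l.foldl (fun g n => (Int.gcd g n : Int)) g ↔ c ∣ g ∧ ∀ n ∈ l, c ∣ n) := by
  induction l with
  | nil => intro g; simp
  | cons n t ih =>
    intro g
    simp only [List.foldl_cons, ih, List.mem_cons]
    constructor
    · rintro ⟨h1, h2⟩
      exact ⟨h1.trans (Int.gcd_dvd_left g n), fun m hm => hm.elim (fun e => e ▸ h1.trans (Int.gcd_dvd_right g n)) (h2 m)⟩
    · rintro ⟨h1, h2⟩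
      refine ⟨?_, fun m hm => h2 m (Or.inr hm)⟩
      exact Int.dvd_coe_gcd h1 (h2 n (Or.inl rfl))

theorem fgf_dvd_G (numbers : List Int) (c : Int) :
    c ∣ fgfG numbers ↔ ∀ n ∈ numbers, c ∣ n := by
  unfold fgfG
  rw [fgf_dvd_aux]
  simp

theorem fgf_G_nonneg_aux (l : List Int) : ∀ (g : Int), 0 ≤ g →
    0 ≤ l.foldl (fun g n => (Int.gcd g n : Int)) g := by
  induction l with
  | nil => intro g hg; exact hg
  | cons n t ih => intro g _; exact ih _ (by positivity)

theorem fgf_G_nonneg (numbers : List Int) : 0 ≤ fgfG numbers := by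
  exact fgf_G_nonneg_aux numbers 0 le_rfl

theorem fgf_scan_spec (g : Int) :
    ∀ (fuel : Nat) (c : Int), 1 ≤ c → c.toNat ≤ fuel →
      (fgfScan g c fuel) ∣ g ∧ 1 ≤ fgfScan g c fuel ∧ fgfScan g c fuel ≤ c ∧
      ∀ d, fgfScan g c fuel < d → d ≤ c → ¬ d ∣ g := by
  intro fuel
  induction fuel with
  | zero => intro c hc hf; omega
  | succ f ih =>
    intro c hc hf
    rw [fgfScan]
    by_cases h : PySem.Int.mod g c = 0
    · have hdvd : c ∣ g := (PySem.Int.mod_eq_zero_iff_dvd g c).mp h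
      simp only [h, beq_self_eq_true, if_true]
      exact ⟨hdvd, hc, le_rfl, fun d h1 h2 _ => absurd (lt_of_lt_of_le h1 h2) (lt_irrefl c)⟩
    · have hc2 : 2 ≤ c := by
        rcases eq_or_lt_of_le hc with he | hlt
        · exact absurd ((PySem.Int.mod_eq_zero_iff_dvd g c).mpr (he ▸ one_dvd g)) h
        · omega
      simp only [beq_iff_eq, h, if_false]
      obtain ⟨p1, p2, p3, p4⟩ := ih (c - 1) (by omega) (by omega)
      refine ⟨p1, p2, by omega, fun d h1 h2 hd => ?_⟩
      by_cases hdc : d = c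
      · exact h ((PySem.Int.mod_eq_zero_iff_dvd g c).mpr (hdc ▸ hd))
      · exact p4 d h1 (by omega) hd

theorem fgf_filter_erase (c : Int) : ∀ (l : List Int),
    (l.erase c).filter (fun x => x ≠ c) = l.filter (fun x => x ≠ c) := by
  intro l
  induction l with
  | nil => rfl
  | cons x xs ih =>
    by_cases hx : x = c
    · subst hx
      simp [List.erase_cons]
    · have he : (x :: xs).erase c = x :: xs.erase c := List.erase_cons_tail (by simp [hx])
      rw [he, List.filter_cons, List.filter_cons, ih]

theorem fgf_notmem_filter (c : Int) (l : List Int) (hc : c ∉ l) :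
    l.filter (fun x => x ≠ c) = l := by
  apply List.filter_eq_self.mpr
  intro x hx
  simp only [ne_eq, decide_not, Bool.not_eq_eq_eq_not, Bool.not_true, decide_eq_false_iff_not]
  exact fun e => hc (e ▸ hx)

theorem fgf_removeAll_eq_filter (c : Int) :
    ∀ (fuel : Nat) (l : List Int), l.count c ≤ fuel →
      fgfRemoveAll fuel l c = l.filter (fun x => x ≠ c) := by
  intro fuel
  induction fuel with
  | zero =>
    intro l h
    have hc : c ∉ l := by
      rw [← List.count_eq_zero]
      omega
    rw [fgfRemoveAll, fgf_notmem_filter c l hc]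
  | succ f ih =>
    intro l h
    rw [fgfRemoveAll]
    by_cases hc : c ∈ l
    · have hcont : l.contains c = true := List.contains_iff_mem.mpr hc
      simp only [hcont, if_true]
      rw [PySem.List.remove?_eq_some_erase l c hc]
      simp only [Option.getD_some]
      rw [ih (l.erase c) (by
        have h1 := List.count_erase_self (a := c) (l := l)
        have h2 : 1 ≤ List.count c l := List.count_pos_iff.mpr hc
        omega)]
      exact fgf_filter_erase c l
    · have hcont : l.contains c = false := by simpa using hc
      simp only [hcont, if_false]
      exact (fgf_notmem_filter c l hc).symm

theorem fgf_mem_prune (p : Int → Bool) (x : Int) :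
    ∀ (l : List Int) (cf : List Int),
      (x ∈ l.foldl (fun cf c => if p c then cf.filter (fun y => y ≠ c) else cf) cf ↔
        x ∈ cf ∧ ∀ c ∈ l, p c → x ≠ c) := by
  intro l
  induction l with
  | nil => intro cf; simp
  | cons c t ih =>
    intro cf
    simp only [List.foldl_cons, ih, List.mem_cons]
    by_cases hp : p c <;> simp [hp, List.mem_filter] <;> tauto

theorem fgf_mem_prune2 (q : Int → Int → Bool) (x : Int) (R : List Int) :
    ∀ (l : List Int) (cf : List Int),
      (x ∈ l.foldl (fun cf n => R.foldl (fun cf c => if q n c then cf.filter (fun y => y ≠ c) else cf) cf) cf ↔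
        x ∈ cf ∧ ∀ n ∈ l, ∀ c ∈ R, q n c → x ≠ c) := by
  intro l
  induction l with
  | nil => intro cf; simp
  | cons n t ih =>
    intro cf
    simp only [List.foldl_cons, ih, fgf_mem_prune (q n) x R cf, List.mem_cons]
    constructor
    · rintro ⟨⟨h1, h2⟩, h3⟩
      exact ⟨h1, fun m hm => hm.elim (fun e => e ▸ h2) (h3 m)⟩
    · rintro ⟨h1, h2⟩
      exact ⟨⟨h1, h2 n (Or.inl rfl)⟩, fun m hm => h2 m (Or.inr hm)⟩

-- membership in A's final list cf2
theorem fgf_mem_cf2 (numbers : List Int) (H : Int) (hne : numbers ≠ []) (hH : 1 ≤ H) (x : Int) :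
    (x ∈ (numbers.foldl (fun cf n =>
      (PySem.List.pyRange 1 (H + 1) 1).foldl (fun cf c =>
        if !(PySem.Int.mod n c == 0) && cf.contains c then fgfRemoveAll cf.length cf c else cf) cf)
      (numbers.foldl (fun cf n =>
      (PySem.List.pyRange 1 (H + 1) 1).foldl (fun cf c =>
        if PySem.Int.mod n c == 0 then cf ++ [c] else cf) cf) [])) ↔
      (1 ≤ x ∧ x ≤ H ∧ ∀ n ∈ numbers, x ∣ n)) := by
  have hcf1 : (numbers.foldl (fun cf n =>
      (PySem.List.pyRange 1 (H + 1) 1).foldl (fun cf c =>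
        if PySem.Int.mod n c == 0 then cf ++ [c] else cf) cf) [])
      = numbers.flatMap (fun n => (PySem.List.pyRange 1 (H + 1) 1).filter (fun c => PySem.Int.mod n c == 0)) := by
    have hfun : (fun (cf : List Int) (n : Int) =>
        (PySem.List.pyRange 1 (H + 1) 1).foldl (fun cf c =>
          if PySem.Int.mod n c == 0 then cf ++ [c] else cf) cf)
        = fun cf n => cf ++ (PySem.List.pyRange 1 (H + 1) 1).filter (fun c => PySem.Int.mod n c == 0) := by
      funext cf n
      exact PySem.List.foldl_append_if_eq_filter _ _ _
    rw [hfun, PySem.List.foldl_append_eq_flatMap, List.nil_append]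
  have hstep : (fun (cf : List Int) (n : Int) =>
        (PySem.List.pyRange 1 (H + 1) 1).foldl (fun cf c =>
          if !(PySem.Int.mod n c == 0) && cf.contains c then fgfRemoveAll cf.length cf c else cf) cf)
      = fun cf n => (PySem.List.pyRange 1 (H + 1) 1).foldl (fun cf c =>
          if !(PySem.Int.mod n c == 0) then cf.filter (fun y => y ≠ c) else cf) cf := by
    funext cf n
    congr 1
    funext cf c
    by_cases hm : PySem.Int.mod n c = 0
    · simp [hm]
    · by_cases hcc : c ∈ cf
      · have hcont : cf.contains c = true := List.contains_iff_mem.mpr hcc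
        have hb : (PySem.Int.mod n c == 0) = false := by simpa using hm
        rw [hb, hcont]
        simp only [Bool.not_false, Bool.and_self, if_true]
        exact fgf_removeAll_eq_filter c cf.length cf List.count_le_length
      · have hcont : cf.contains c = false := by simpa using hcc
        have hb : (PySem.Int.mod n c == 0) = false := by simpa using hm
        rw [hb, hcont]
        simp only [Bool.not_false, Bool.and_false, if_false, if_true]
        exact (fgf_notmem_filter c cf hcc).symm
  rw [hcf1, hstep, fgf_mem_prune2]
  simp only [List.mem_flatMap, List.mem_filter, PySem.List.mem_pyRange_one, beq_iff_eq,
    Bool.not_eq_eq_eq_not, Bool.not_true, decide_eq_false_iff_not, decide_eq_true_eq]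
  constructor
  · rintro ⟨⟨n, hn, ⟨hx1, hx2⟩, hmod⟩, hprune⟩
    refine ⟨hx1, by omega, fun m hm => ?_⟩
    by_contra hnd
    have hmodm : PySem.Int.mod m x ≠ 0 := fun e => hnd ((PySem.Int.mod_eq_zero_iff_dvd m x).mp e)
    exact (hprune m hm x ⟨hx1, hx2⟩ (by simpa using hmodm)) rfl
  · rintro ⟨hx1, hx2, hall⟩
    obtain ⟨n0, hn0⟩ := List.exists_mem_of_ne_nil numbers hne
    refine ⟨⟨n0, hn0, ⟨hx1, by omega⟩, (PySem.Int.mod_eq_zero_iff_dvd n0 x).mpr (hall n0 hn0)⟩, ?_⟩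
    intro n hn c _ hmod he
    exact absurd ((PySem.Int.mod_eq_zero_iff_dvd n c).mpr (he ▸ hall n hn)) (by simpa using hmod)

theorem fgf_final (numbers : List Int) (H : Int) (hne : numbers ≠ []) (hH : 1 ≤ H)
    (L : List Int) (hmem : ∀ x, x ∈ L ↔ (1 ≤ x ∧ x ≤ H ∧ ∀ n ∈ numbers, x ∣ n)) :
    (PySem.List.max? L (fun x => x)).getD 0
      = if (fgfG numbers == 0) = true then H
        else fgfScan (fgfG numbers) (if fgfG numbers < H then fgfG numbers else H)
              (if fgfG numbers < H then fgfG numbers else H).toNat := by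
  have h1 : (1 : Int) ∈ L := (hmem 1).mpr ⟨le_rfl, hH, fun n _ => one_dvd n⟩
  cases hm : PySem.List.max? L (fun x => x) with
  | none =>
    rw [(PySem.List.max?_eq_none_iff L _).mp hm] at h1
    simp at h1
  | some m =>
    obtain ⟨hm1, hm2, hm3⟩ := (hmem m).mp (PySem.List.max?_mem hm)
    have hmax : ∀ y ∈ L, y ≤ m := PySem.List.max?_isMax hm
    simp only [Option.getD_some]
    by_cases hg : fgfG numbers = 0
    · have hall0 : ∀ n ∈ numbers, n = 0 := fun n hn =>
        Int.zero_dvd.mp ((fgf_dvd_G numbers 0).mp (by rw [hg]) n hn)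
      have hHin : H ∈ L := (hmem H).mpr ⟨hH, le_rfl, fun n hn => (hall0 n hn) ▸ dvd_zero H⟩
      have := hmax H hHin
      simp only [hg]
      norm_num
      omega
    · have hgpos : 0 < fgfG numbers := lt_of_le_of_ne (fgf_G_nonneg numbers) (Ne.symm hg)
      have hbe : (fgfG numbers == 0) = false := by simpa using hg
      rw [hbe]
      simp only [Bool.false_eq_true, if_false]
      obtain ⟨p1, p2, p3, p4⟩ := fgf_scan_spec (fgfG numbers)
        (if fgfG numbers < H then fgfG numbers else H).toNat
        (if fgfG numbers < H then fgfG numbers else H) (by split <;> omega) le_rfl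
      have hc0H : (if fgfG numbers < H then fgfG numbers else H) ≤ H := by split <;> omega
      have hrin := (hmem _).mpr ⟨p2, le_trans p3 hc0H, fun n hn => ((fgf_dvd_G numbers _).mp p1) n hn⟩
      have hle1 := hmax _ hrin
      have hmdg : m ∣ fgfG numbers := (fgf_dvd_G numbers m).mpr hm3
      have hmg : m ≤ fgfG numbers := Int.le_of_dvd hgpos hmdg
      have hmc0 : m ≤ (if fgfG numbers < H then fgfG numbers else H) := by split <;> omega
      have hle2 : m ≤ fgfScan (fgfG numbers) (if fgfG numbers < H then fgfG numbers else H)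
          (if fgfG numbers < H then fgfG numbers else H).toNat := by
        by_contra hlt
        exact (p4 m (by omega) hmc0) hmdg
      simp only [] at hle1
      omega

-- ===== VERDICT (by name: the statement is the Claim_ definition above) =====
theorem find_greatest_factor_spec : Claim_equal_find_greatest_factor := by
  intro numbers H _ hpre
  obtain ⟨hne, hH⟩ := hpre
  simp only [Spec_find_greatest_factor, find_greatest_factor, find_greatest_factor_alt]
  have hempty : numbers.isEmpty = false := by simpa using hne
  have hlt : decide (H < 1) = false := decide_eq_false (by omega)
  rw [hempty, hlt]
  simp only [Bool.or_self, Bool.false_eq_true, if_false]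
  rw [fgf_fold_eq_G]
  exact fgf_final numbers H hne hH _ (fgf_mem_cf2 numbers H hne hH)
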